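-- pv_equiv track=rewrite | github.com/Logan-Kelsch/Structural_Regression | src/transform.py | F_WITH
-- ===== SOURCE A (Python) =====
-- def F_WITH(
-- 	param	:	str	=	'x'
-- ):
-- 	f_p = {
-- 		0:['x'],#ID 0
-- 		1:['x', 'd'],#ID 1
-- 		2:['x', 'd'],#ID 2
-- 		3:['x', 'd'],#ID 3
-- 		4:['x'],#ID 4
-- 		5:['x', 'a'],#ID 5
-- 		6:['x', 'a'],#ID 6
-- 		7:['x'],#ID 7
-- 		8:['x'],#ID 8
-- 		9:['x'],#ID 9
-- 		10:['x'],#ID 10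
-- 		11:['x'],#ID 11
-- 		12:['x', 'd', 'dd'],#ID 12
-- 		13:['x', 'k'],#ID 13
-- 		14:['x', 'd'],#ID 14
-- 		15:['x', 'd', 'dd'],#ID 15
-- 		16:['x', 'd'],#ID 16
-- 		17:['x', 'd'],#ID 17
-- 		18:['x', 'd'],#ID 18
-- 		19:['x'],#ID 19
-- 		20:['x', 'a', 'd'],#ID 20
-- 		21:['x', 'a', 'd'],#ID 21
-- 	}
-- 	return [k for k, v in f_p.items() if param in v]
-- ===== SOURCE B (Python) =====
-- def F_WITH(
-- 	param	:	str	=	'x'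
-- ):
-- 	f_inv = {
-- 		'x': [0,1,2,3,4,5,6,7,8,9,10,11,12,13,14,15,16,17,18,19,20,21],
-- 		'd': [1,2,3,12,14,15,16,17,18,20,21],
-- 		'a': [5,6,20,21],
-- 		'dd': [12,15],
-- 		'k': [13],
-- 	}
-- 	return f_inv.get(param, [])
-- ===== Notes on version B (the rewrite author's own statement) =====
-- stated objective: idiomatic
-- what changed: Replaces the ID->feature-list dict plus a per-ID membership filter with a precomputed inverted index keyed by feature name, answered by a single dict lookup.
import Mathlib
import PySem

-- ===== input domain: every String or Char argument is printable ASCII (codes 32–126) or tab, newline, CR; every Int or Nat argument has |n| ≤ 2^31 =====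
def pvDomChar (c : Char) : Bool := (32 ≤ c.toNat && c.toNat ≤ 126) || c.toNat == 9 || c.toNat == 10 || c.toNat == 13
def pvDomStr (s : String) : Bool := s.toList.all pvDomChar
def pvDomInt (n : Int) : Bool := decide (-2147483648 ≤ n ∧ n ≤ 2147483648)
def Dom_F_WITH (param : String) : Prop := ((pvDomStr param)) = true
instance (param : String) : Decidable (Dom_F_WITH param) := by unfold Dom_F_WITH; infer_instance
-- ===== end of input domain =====

-- B changes: an inverted index (feature name → sorted ID list) replaces A's ID→features dict and its membership filter; same results.

-- ===== PORT A =====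
-- A's dict literal f_p (distinct keys, insertion order) as an association list
def fpA : List (Int × List String) :=
  [(0, ["x"]), (1, ["x", "d"]), (2, ["x", "d"]), (3, ["x", "d"]), (4, ["x"]),
   (5, ["x", "a"]), (6, ["x", "a"]), (7, ["x"]), (8, ["x"]), (9, ["x"]),
   (10, ["x"]), (11, ["x"]), (12, ["x", "d", "dd"]), (13, ["x", "k"]),
   (14, ["x", "d"]), (15, ["x", "d", "dd"]), (16, ["x", "d"]), (17, ["x", "d"]),
   (18, ["x", "d"]), (19, ["x"]), (20, ["x", "a", "d"]), (21, ["x", "a", "d"])]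

-- [k for k, v in f_p.items() if param in v]
def F_WITH (param : String) : List Int :=
  fpA.filterMap (fun kv => if param ∈ kv.2 then some kv.1 else none)

-- ===== PORT B =====
-- B's inverted index f_inv
def fInvB : PySem.Dict String (List Int) :=
  PySem.Dict.ofList
    [("x", [0,1,2,3,4,5,6,7,8,9,10,11,12,13,14,15,16,17,18,19,20,21]),
     ("d", [1,2,3,12,14,15,16,17,18,20,21]),
     ("a", [5,6,20,21]),
     ("dd", [12,15]),
     ("k", [13])]

-- f_inv.get(param, [])
def F_WITH_alt (param : String) : List Int :=
  fInvB.getD param []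

-- ===== PRECONDITION & SPEC =====
def Spec_F_WITH (param : String) (out : List Int) : Prop := out = F_WITH_alt param
instance (param : String) (out : List Int) : Decidable (Spec_F_WITH param out) := by unfold Spec_F_WITH; infer_instance

-- ===== CLAIM (what is proved, stated in full; the proofs are below) =====
def Claim_equal_F_WITH : Prop := ∀ (param : String), Dom_F_WITH param → Spec_F_WITH param (F_WITH param)

-- ===== LEMMAS AND PROOFS =====

-- ===== VERDICT (by name: the statement is the Claim_ definition above) =====
theorem F_WITH_spec : Claim_equal_F_WITH := by
  intro param _
  unfold Spec_F_WITH
  by_cases h1 : param = "x"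
  · subst h1; decide
  by_cases h2 : param = "d"
  · subst h2; decide
  by_cases h3 : param = "a"
  · subst h3; decide
  by_cases h4 : param = "dd"
  · subst h4; decide
  by_cases h5 : param = "k"
  · subst h5; decide
  have hA : F_WITH param = [] := by
    simp [F_WITH, fpA, h1, h2, h3, h4, h5]
  have hB : F_WITH_alt param = [] := by
    have hit : fInvB.items =
        [("x", [0,1,2,3,4,5,6,7,8,9,10,11,12,13,14,15,16,17,18,19,20,21]),
         ("d", [1,2,3,12,14,15,16,17,18,20,21]),
         ("a", [5,6,20,21]),
         ("dd", [12,15]),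
         ("k", [13])] := by rfl
    have e1 : ("x" == param) = false := beq_eq_false_iff_ne.mpr (Ne.symm h1)
    have e2 : ("d" == param) = false := beq_eq_false_iff_ne.mpr (Ne.symm h2)
    have e3 : ("a" == param) = false := beq_eq_false_iff_ne.mpr (Ne.symm h3)
    have e4 : ("dd" == param) = false := beq_eq_false_iff_ne.mpr (Ne.symm h4)
    have e5 : ("k" == param) = false := beq_eq_false_iff_ne.mpr (Ne.symm h5)
    simp [F_WITH_alt, PySem.Dict.getD, PySem.Dict.get?, hit, List.find?,
      e1, e2, e3, e4, e5]
  rw [hA, hB]
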